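-- pv_equiv track=rewrite | github.com/apoorvaanand1998/project-euler | 24i.py | factoradic
-- ===== SOURCE A (Python) =====
-- def factoradic(n):
--     l = []
--     i = 1
--     while n > 0:
--         l.append(n%i)
--         n //= i
--         i += 1
--     return l[::-1]
-- ===== SOURCE B (Python) =====
-- def factoradic(n):
--     if n <= 0:
--         return []
--     # find the largest k with k! <= n, keeping f = k!
--     f, k = 1, 0
--     while f * (k + 1) <= n:
--         k += 1
--         f *= k
--     # emit digits most-significant first, descending through the factorials
--     out = []
--     for j in range(k, -1, -1):
--         out.append(n // f)
--         n %= f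
--         if j > 0:
--             f //= j
--     return out
-- ===== Notes on version B (the rewrite author's own statement) =====
-- stated objective: alternative
-- what changed: B computes the factoradic most-significant-digit first: it finds the largest k with k! <= n by an ascending factorial loop, then emits digits by dividing/taking remainders down through the factorials, with no list reversal; A builds digits least-significant first by the n%i, n//=i ascending recurrence and reverses.
import Mathlib
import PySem

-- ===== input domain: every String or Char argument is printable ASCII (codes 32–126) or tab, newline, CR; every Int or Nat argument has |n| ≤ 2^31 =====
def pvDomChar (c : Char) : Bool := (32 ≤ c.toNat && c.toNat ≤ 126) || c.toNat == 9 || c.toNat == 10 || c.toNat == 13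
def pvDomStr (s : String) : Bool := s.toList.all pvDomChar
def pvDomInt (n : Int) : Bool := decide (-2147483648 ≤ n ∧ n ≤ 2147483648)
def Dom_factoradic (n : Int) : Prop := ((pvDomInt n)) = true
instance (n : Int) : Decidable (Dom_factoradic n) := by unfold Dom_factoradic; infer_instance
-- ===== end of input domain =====

-- B emits the factoradic digits most-significant first (largest factorial place found by an
-- ascending factorial search, then division descending) instead of A's LSB-first remainder
-- loop followed by a reversal; same cost, different decomposition ("alternative").

-- ===== PORT A =====
-- measure decrease for the while loop (used by factLoop's decreasing_by and the proofs)
lemma mu_dec (n i : Int) (h : 0 < n) :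
    (PySem.Int.floordiv n i).toNat + (if i + 1 ≤ 1 then 1 else 0)
      < n.toNat + (if i ≤ 1 then 1 else 0) := by
  rcases lt_trichotomy i 1 with hi | hi | hi
  · have hq : PySem.Int.floordiv n i ≤ 0 := by
      show Int.fdiv n i ≤ 0
      rcases lt_or_eq_of_le (by omega : i ≤ 0) with h0 | h0
      · exact Int.fdiv_nonpos_of_nonneg_of_nonpos (by omega) (by omega)
      · rw [h0, Int.fdiv_zero]
    split_ifs <;> omega
  · subst hi
    have hq : PySem.Int.floordiv n 1 = n := by
      rw [PySem.Int.floordiv_eq_ediv_of_pos (by omega)]; simp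
    split_ifs <;> omega
  · have hq : PySem.Int.floordiv n i < n := by
      rw [PySem.Int.floordiv_lt_iff_lt_mul (by omega)]
      nlinarith
    have hq0 : 0 ≤ PySem.Int.floordiv n i := by
      rw [PySem.Int.le_floordiv_iff_mul_le (by omega)]
      nlinarith
    split_ifs <;> omega

-- the while loop: state (n, i, l)
def factLoop (n i : Int) (l : List Int) : List Int :=
  if 0 < n then
    factLoop (PySem.Int.floordiv n i) (i + 1) (l ++ [PySem.Int.mod n i])
  else l
termination_by n.toNat + (if i ≤ 1 then 1 else 0)
decreasing_by rename_i h; exact mu_dec n i h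

def factoradic (n : Int) : List Int :=
  ((PySem.List.slice? (factLoop n 1 []) none none (-1)).getD [])   -- l[::-1]

-- ===== PORT B =====
-- ascending search for the largest k with k! ≤ n, keeping f = k!.
-- the '1 ≤ f ∧ 0 ≤ k' conjuncts are totality guards only: they hold on every state the
-- initial call (k, f) = (0, 1) reaches, so the behaviour matches Source B's plain while loop.
def altK (n k f : Int) : Int × Int :=
  if 1 ≤ f ∧ 0 ≤ k ∧ f * (k + 1) ≤ n then
    altK n (k + 1) (f * (k + 1))
  else (k, f)
termination_by (n - k).toNat
decreasing_by
  rename_i h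
  obtain ⟨hf, hk, hle⟩ := h
  have : k + 1 ≤ f * (k + 1) := le_mul_of_one_le_left (by omega) hf
  omega

-- the descending emission loop: for j in range(k, -1, -1)
def altJ (j : Nat) (f n : Int) (out : List Int) : List Int :=
  match j with
  | 0 => out ++ [PySem.Int.floordiv n f]
  | j' + 1 =>
      altJ j' (PySem.Int.floordiv f ((j' : Int) + 1)) (PySem.Int.mod n f)
        (out ++ [PySem.Int.floordiv n f])

def factoradic_alt (n : Int) : List Int :=
  if n ≤ 0 then []
  else
    let kf := altK n 0 1
    altJ kf.1.toNat kf.2 n []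

-- ===== PRECONDITION & SPEC =====
def Spec_factoradic (n : Int) (out : List Int) : Prop := out = factoradic_alt n
instance (n : Int) (out : List Int) : Decidable (Spec_factoradic n out) := by unfold Spec_factoradic; infer_instance

-- ===== CLAIM (what is proved, stated in full; the proofs are below) =====
def Claim_equal_factoradic : Prop := ∀ (n : Int), Dom_factoradic n → Spec_factoradic n (factoradic n)

-- ===== LEMMAS AND PROOFS =====

-- rf i t = i * (i+1) * ... * (i+t-1), the rising factorial; rf 1 t = t!
def rf : Int → Nat → Int
  | _, 0 => 1
  | i, (t+1) => i * rf (i+1) t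

-- refG i j m : the j+1 digits of m, most significant first, in the mixed radix whose places
-- are rf i j, rf i (j-1), ..., rf i 0
def refG : Int → Nat → Int → List Int
  | _, 0, m => [m]
  | i, (j+1), m => (m / rf i (j+1)) :: refG i j (m % rf i (j+1))

lemma rf_pos : ∀ (t : Nat) (i : Int), 1 ≤ i → 0 < rf i t := by
  intro t
  induction t with
  | zero => intro i _; simp [rf]
  | succ t ih =>
      intro i hi
      have := ih (i + 1) (by omega)
      simp only [rf]
      positivity

lemma rf_succ_right : ∀ (t : Nat) (i : Int), rf i (t+1) = rf i t * (i + t) := by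
  intro t
  induction t with
  | zero => intro i; simp [rf]
  | succ t ih =>
      intro i
      show i * rf (i+1) (t+1) = rf i (t+1) * (i + (t+1 : Nat))
      rw [ih (i+1)]
      show i * (rf (i+1) t * (i + 1 + t)) = i * rf (i+1) t * (i + ((t:Int)+1))
      ring

lemma rf1_mono : ∀ s t : Nat, s ≤ t → rf 1 s ≤ rf 1 t := by
  intro s t h
  induction t, h using Nat.le_induction with
  | base => exact le_rfl
  | succ t _ ih =>
      have h1 := rf_pos t 1 (by omega)
      calc rf 1 s ≤ rf 1 t := ih
        _ ≤ rf 1 t * (1 + t) := le_mul_of_one_le_right (by omega) (by omega)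
        _ = rf 1 (t+1) := (rf_succ_right t 1).symm

lemma rf1_unique (s t : Nat) (n : Int)
    (h1 : rf 1 s ≤ n) (h2 : n < rf 1 (s+1)) (h3 : rf 1 t ≤ n) (h4 : n < rf 1 (t+1)) :
    s = t := by
  rcases lt_trichotomy s t with h | h | h
  · exact absurd (le_trans (rf1_mono (s+1) t h) h3) (by omega)
  · exact h
  · exact absurd (le_trans (rf1_mono (t+1) s h) h1) (by omega)

lemma refG_step : ∀ (L : Nat) (i q r : Int), 0 ≤ q → 0 ≤ r → r < i →
    refG (i+1) L q ++ [r] = refG i (L+1) (i*q + r) := by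
  intro L
  induction L with
  | zero =>
      intro i q r hq hr hri
      have hi : 0 < i := by omega
      have h1 : rf i 1 = i := by simp [rf]
      show [q, r] = ((i*q + r) / rf i 1) :: [(i*q + r) % rf i 1]
      rw [h1]
      have hdiv : (i*q + r) / i = q := by
        rw [add_comm, Int.add_mul_ediv_left r q (by omega), Int.ediv_eq_zero_of_lt hr hri]
        omega
      have hmod : (i*q + r) % i = r := by
        rw [add_comm, mul_comm, Int.add_mul_emod_self_right, Int.emod_eq_of_lt hr hri]
      rw [hdiv, hmod]
  | succ L ih =>
      intro i q r hq hr hri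
      have hi : 0 < i := by omega
      set P := rf (i+1) (L+1) with hP
      have hPpos : 0 < P := rf_pos (L+1) (i+1) (by omega)
      have hrfi : rf i (L+2) = i * P := rfl
      have hhead : (i*q + r) / (i * P) = q / P := by
        rw [← Int.ediv_ediv_of_nonneg (by omega : (0:Int) ≤ i)]
        congr 1
        rw [add_comm, Int.add_mul_ediv_left r q (by omega), Int.ediv_eq_zero_of_lt hr hri]
        omega
      have htail : (i*q + r) % (i * P) = i * (q % P) + r := by
        have e1 : (i*q + r) % (i*P) = (i*q + r) - (i*P) * ((i*q + r) / (i*P)) := Int.emod_def _ _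
        have e2 : q % P = q - P * (q / P) := Int.emod_def _ _
        rw [e1, hhead]
        rw [e2]; ring
      show ((q / P) :: (refG (i+1) L (q % P) ++ [r]))
          = ((i*q + r) / rf i (L+2)) :: refG i (L+1) ((i*q + r) % rf i (L+2))
      rw [hrfi, hhead, htail,
        ih i (q % P) r (Int.emod_nonneg q (by omega)) hr hri]

-- ===== A side =====

lemma factLoop_stop (n i : Int) (l : List Int) (h : ¬ 0 < n) : factLoop n i l = l := by
  rw [factLoop]; simp [h]

lemma factLoop_go (n i : Int) (l : List Int) (h : 0 < n) :
    factLoop n i l = factLoop (PySem.Int.floordiv n i) (i + 1) (l ++ [PySem.Int.mod n i]) := by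
  rw [factLoop]; simp [h]

lemma factLoop_acc_aux : ∀ (N : Nat) (n i : Int),
    n.toNat + (if i ≤ 1 then 1 else 0) ≤ N →
    ∀ l, factLoop n i l = l ++ factLoop n i [] := by
  intro N
  induction N with
  | zero =>
      intro n i hN l
      have hn : ¬ 0 < n := by split_ifs at hN <;> omega
      rw [factLoop_stop _ _ _ hn, factLoop_stop _ _ _ hn]; simp
  | succ N ih =>
      intro n i hN l
      by_cases h : 0 < n
      · have hd := mu_dec n i h
        rw [factLoop_go _ _ _ h, factLoop_go _ _ [] h,
          ih _ _ (by omega) (l ++ [PySem.Int.mod n i]),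
          ih _ _ (by omega) ([] ++ [PySem.Int.mod n i])]
        simp
      · rw [factLoop_stop _ _ _ h, factLoop_stop _ _ _ h]; simp

lemma factLoop_acc (n i : Int) (l : List Int) :
    factLoop n i l = l ++ factLoop n i [] :=
  factLoop_acc_aux (n.toNat + (if i ≤ 1 then 1 else 0)) n i le_rfl l

lemma factLoop_char : ∀ (N : Nat) (n i : Int), 0 < n → n.toNat ≤ N → 2 ≤ i →
    ∃ L : Nat, rf i L ≤ n ∧ n < rf i (L+1) ∧ (factLoop n i []).reverse = refG i L n := by
  intro N
  induction N with
  | zero => intro n i hn hN _; omega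
  | succ N ih =>
      intro n i hn hN hi
      have hipos : (0:Int) < i := by omega
      have hq : PySem.Int.floordiv n i = n / i := PySem.Int.floordiv_eq_ediv_of_pos hipos
      have hr : PySem.Int.mod n i = n % i := PySem.Int.mod_eq_emod_of_pos hipos
      by_cases hlt : n < i
      · -- one more iteration, then the quotient is 0 and the loop stops
        refine ⟨0, by simp [rf]; omega, ?_, ?_⟩
        · show n < i * rf (i+1) 0
          simp [rf]; omega
        · rw [factLoop_go _ _ _ hn, hq, hr, Int.ediv_eq_zero_of_lt (by omega) hlt,
            factLoop_stop _ _ _ (by omega)]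
          simp [refG, Int.emod_eq_of_lt (by omega) hlt]
      · -- quotient ≥ 1: recurse
        have hqge : 1 ≤ n / i := by
          rw [Int.le_ediv_iff_mul_le hipos]; omega
        have hqlt : n / i < n := by
          rw [← hq, PySem.Int.floordiv_lt_iff_lt_mul hipos]; nlinarith
        obtain ⟨L', hb1, hb2, hrev⟩ :=
          ih (n / i) (i+1) (by omega) (by omega) (by omega)
        have hrnn : 0 ≤ n % i := Int.emod_nonneg n (by omega)
        have hrlt : n % i < i := Int.emod_lt_of_pos n hipos
        have hne : i * (n / i) + n % i = n := Int.mul_ediv_add_emod n i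
        refine ⟨L' + 1, ?_, ?_, ?_⟩
        · show i * rf (i+1) L' ≤ n
          have : i * rf (i+1) L' ≤ i * (n / i) :=
            mul_le_mul_of_nonneg_left hb1 (by omega)
          omega
        · show n < i * rf (i+1) (L'+1)
          have : i * (n / i + 1) ≤ i * rf (i+1) (L'+1) :=
            mul_le_mul_of_nonneg_left (by omega) (by omega)
          nlinarith
        · rw [factLoop_go _ _ _ hn, hq, hr, factLoop_acc]
          simp only [List.nil_append, List.reverse_append, List.reverse_cons,
            List.reverse_nil, List.nil_append]
          rw [hrev]
          have := refG_step L' i (n / i) (n % i) (by omega) hrnn hrlt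
          rw [show refG (i+1) L' (n / i) ++ [n % i] = refG i (L'+1) (i * (n / i) + n % i) from this,
            hne]

-- ===== B side =====

lemma altK_char : ∀ (c : Nat) (k f n : Int), 0 ≤ k → f = rf 1 k.toNat → f ≤ n →
    (n - k).toNat ≤ c →
    0 ≤ (altK n k f).1 ∧ (altK n k f).2 = rf 1 (altK n k f).1.toNat ∧
      (altK n k f).2 ≤ n ∧ n < rf 1 ((altK n k f).1.toNat + 1) := by
  intro c
  induction c with
  | zero =>
      intro k f n hk hf hfn hc
      have hfpos : 1 ≤ f := by rw [hf]; exact rf_pos _ 1 (by omega)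
      have hstop : ¬ (1 ≤ f ∧ 0 ≤ k ∧ f * (k + 1) ≤ n) := by
        rintro ⟨h1, h2, h3⟩
        have : k + 1 ≤ f * (k + 1) := le_mul_of_one_le_left (by omega) h1
        omega
      rw [altK]
      simp only [if_neg hstop]
      refine ⟨hk, hf, hfn, ?_⟩
      have hrs : rf 1 (k.toNat + 1) = rf 1 k.toNat * (1 + k.toNat) := rf_succ_right _ 1
      have hcast : ((k.toNat : Int)) = k := Int.toNat_of_nonneg hk
      simp only [not_and, not_le] at hstop
      have := hstop hfpos hk
      rw [hrs, hcast] at *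
      nlinarith [this]
  | succ c ih =>
      intro k f n hk hf hfn hc
      have hfpos : 1 ≤ f := by rw [hf]; exact rf_pos _ 1 (by omega)
      by_cases hcond : 1 ≤ f ∧ 0 ≤ k ∧ f * (k + 1) ≤ n
      · rw [altK]
        rw [if_pos hcond]
        have hcast : ((k.toNat : Int)) = k := Int.toNat_of_nonneg hk
        have hf' : f * (k + 1) = rf 1 (k+1).toNat := by
          have : (k+1).toNat = k.toNat + 1 := by omega
          rw [this, rf_succ_right _ 1, ← hf, hcast]
          ring
        have hstep : k + 1 ≤ f * (k + 1) :=
          le_mul_of_one_le_left (by omega) hfpos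
        exact ih (k+1) (f * (k+1)) n (by omega) hf' hcond.2.2 (by omega)
      · rw [altK]
        simp only [if_neg hcond]
        refine ⟨hk, hf, hfn, ?_⟩
        have hrs : rf 1 (k.toNat + 1) = rf 1 k.toNat * (1 + k.toNat) := rf_succ_right _ 1
        have hcast : ((k.toNat : Int)) = k := Int.toNat_of_nonneg hk
        simp only [not_and, not_le] at hcond
        have := hcond hfpos hk
        rw [hrs, hcast] at *
        nlinarith [this]

lemma altJ_eq : ∀ (j : Nat) (n : Int) (out : List Int),
    altJ j (rf 1 j) n out = out ++ refG 1 j n := by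
  intro j
  induction j with
  | zero =>
      intro n out
      show out ++ [PySem.Int.floordiv n (rf 1 0)] = out ++ [n]
      have : PySem.Int.floordiv n 1 = n := by
        rw [PySem.Int.floordiv_eq_ediv_of_pos (by omega)]; simp
      simp [rf]
  | succ j ih =>
      intro n out
      have hF : (0:Int) < rf 1 (j+1) := rf_pos _ 1 (by omega)
      show altJ j (PySem.Int.floordiv (rf 1 (j+1)) ((j:Int)+1)) (PySem.Int.mod n (rf 1 (j+1)))
          (out ++ [PySem.Int.floordiv n (rf 1 (j+1))]) = out ++ refG 1 (j+1) n
      have hfd : PySem.Int.floordiv (rf 1 (j+1)) ((j:Int)+1) = rf 1 j := by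
        rw [PySem.Int.floordiv_eq_ediv_of_pos (by omega), rf_succ_right _ 1,
          show (1 + (j:Int)) = (j:Int) + 1 by ring]
        exact Int.mul_ediv_cancel _ (by omega)
      rw [hfd, PySem.Int.mod_eq_emod_of_pos hF, PySem.Int.floordiv_eq_ediv_of_pos hF,
        ih (n % rf 1 (j+1)) _]
      show (out ++ [n / rf 1 (j+1)]) ++ refG 1 j (n % rf 1 (j+1))
          = out ++ ((n / rf 1 (j+1)) :: refG 1 j (n % rf 1 (j+1)))
      simp

-- ===== VERDICT (by name: the statement is the Claim_ definition above) =====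
theorem factoradic_spec : Claim_equal_factoradic := by
  intro n _
  unfold Spec_factoradic factoradic factoradic_alt
  by_cases hn : n ≤ 0
  · rw [factLoop_stop _ _ _ (by omega)]
    simp [hn, PySem.List.slice?_none_none_neg_one]
  · simp only [hn, if_false]
    rw [not_le] at hn
    -- B side characterisation
    obtain ⟨hk0, hkf, hfle, hflt⟩ :=
      altK_char (n - 0).toNat 0 1 n le_rfl (by simp [rf]) (by omega) le_rfl
    set K := (altK n 0 1).1.toNat with hK
    -- A side: first iteration divides by 1
    have h1 : PySem.Int.floordiv n 1 = n := by
      rw [PySem.Int.floordiv_eq_ediv_of_pos (by omega)]; simp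
    have h2 : PySem.Int.mod n 1 = 0 := by
      rw [PySem.Int.mod_eq_emod_of_pos (by omega)]; simp
    obtain ⟨L, hb1, hb2, hrev⟩ := factLoop_char n.toNat n 2 hn le_rfl le_rfl
    have hrf1 : rf 1 (L+1) = rf 2 L := by simp [rf]
    have hrf2 : rf 1 (L+2) = rf 2 (L+1) := by simp [rf]
    have hKL : K = L + 1 := by
      apply rf1_unique K (L+1) n (by rw [← hkf]; exact hfle) hflt
      · rw [hrf1]; exact hb1
      · show n < rf 1 (L+1+1); rw [hrf2]; exact hb2
    have hstep := refG_step L 1 n 0 (by omega) le_rfl (by omega)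
    have hA : ((PySem.List.slice? (factLoop n 1 []) none none (-1)).getD [])
        = refG 1 (L+1) n := by
      rw [PySem.List.slice?_none_none_neg_one]
      show (factLoop n 1 []).reverse = refG 1 (L+1) n
      rw [factLoop_go _ _ _ hn, h1, h2, factLoop_acc]
      simp only [List.nil_append, List.reverse_append, List.reverse_cons, List.reverse_nil,
        List.nil_append]
      rw [show (1:Int) + 1 = 2 from rfl, hrev]
      have : refG 2 L n ++ [0] = refG 1 (L+1) (1 * n + 0) := hstep
      simpa using this
    rw [hA, hkf, hKL, altJ_eq]
    simp
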